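-- pv_equiv track=rewrite | github.com/IsaacLynn/ElevatorProject | ElevatorProject/ElevatorProject.py | runElevator
-- ===== SOURCE A (Python) =====
-- def runElevator(_startingFloor, _listOfFloors):
--
--     totalTravelTime = 0
--     # Set our current floor to the starting floor so we can keep track
--     currFloor = _startingFloor
--     listOfFloorsTraveledTo = [currFloor]
--
--     for floor in _listOfFloors:
--         # Since the travel time is 10 per floor, we will take the absolute
--         # difference between the current floor and the floor we want to
--         # go to and add it to the total travel time
--         totalTravelTime += abs(currFloor - floor) * 10
--         currFloor = floor
--         listOfFloorsTraveledTo.append(currFloor)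
--
--     return totalTravelTime, listOfFloorsTraveledTo
-- ===== SOURCE B (Python) =====
-- def runElevator(_startingFloor, _listOfFloors):
--     # Divide and conquer: build the full floor list, then compute the travel
--     # time over an index range by splitting it in half (recursion depth O(log n)).
--     floors = [_startingFloor] + list(_listOfFloors)
--
--     def travel(lo, hi):
--         # travel time over floors[lo..hi]
--         if hi - lo < 1:
--             return 0
--         if hi - lo == 1:
--             return abs(floors[hi] - floors[lo]) * 10
--         mid = (lo + hi) // 2
--         return travel(lo, mid) + travel(mid, hi)
--
--     return travel(0, len(floors) - 1), floors
-- ===== Notes on version B (the rewrite author's own statement) =====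
-- stated objective: alternative
-- what changed: Replaces A's single fused left-to-right loop carrying (time, current floor, growing visited list) with a staged decomposition: build the floor list first, then compute the travel time by divide-and-conquer over index ranges, splitting each range at its midpoint.
import Mathlib
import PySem

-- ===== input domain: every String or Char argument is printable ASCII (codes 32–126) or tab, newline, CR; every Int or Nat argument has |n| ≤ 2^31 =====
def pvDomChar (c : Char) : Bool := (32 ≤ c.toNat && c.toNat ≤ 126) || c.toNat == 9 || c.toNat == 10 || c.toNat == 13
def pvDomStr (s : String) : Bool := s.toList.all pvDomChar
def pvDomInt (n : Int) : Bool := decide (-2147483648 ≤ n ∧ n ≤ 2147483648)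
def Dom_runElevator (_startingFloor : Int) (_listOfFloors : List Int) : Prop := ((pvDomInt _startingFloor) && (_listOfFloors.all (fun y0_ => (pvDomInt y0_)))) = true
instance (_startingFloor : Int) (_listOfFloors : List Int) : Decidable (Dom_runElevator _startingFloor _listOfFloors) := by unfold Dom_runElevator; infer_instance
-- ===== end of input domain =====

-- B builds the floor list first, then computes the travel time by divide-and-conquer over index ranges (alternative decomposition; same cost).
-- ===== PORT A =====
def runElevator (_startingFloor : Int) (_listOfFloors : List Int) : Int × List Int :=
  let st := _listOfFloors.foldl
    (fun (st : Int × Int × List Int) floor =>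
      (st.1 + |st.2.1 - floor| * 10, floor, st.2.2 ++ [floor]))
    (0, _startingFloor, [_startingFloor])
  (st.1, st.2.2)

-- ===== PORT B =====
-- Source B's inner helper 'travel'; it is only ever called with 0 ≤ lo ≤ hi < len(floors),
-- where Python indexing never raises, so plain getD is exact here.
def travelB (floors : List Int) (lo hi : Nat) : Int :=
  if hi - lo < 1 then 0
  else if hi - lo = 1 then |floors.getD hi 0 - floors.getD lo 0| * 10
  else
    let mid := (lo + hi) / 2
    travelB floors lo mid + travelB floors mid hi
termination_by hi - lo
decreasing_by all_goals omega

def runElevator_alt (_startingFloor : Int) (_listOfFloors : List Int) : Int × List Int :=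
  let floors := _startingFloor :: _listOfFloors
  (travelB floors 0 (floors.length - 1), floors)

-- ===== PRECONDITION & SPEC =====
def Spec_runElevator (_startingFloor : Int) (_listOfFloors : List Int) (out : Int × List Int) : Prop := out = runElevator_alt _startingFloor _listOfFloors
instance (_startingFloor : Int) (_listOfFloors : List Int) (out : Int × List Int) : Decidable (Spec_runElevator _startingFloor _listOfFloors out) := by unfold Spec_runElevator; infer_instance

-- ===== CLAIM (what is proved, stated in full; the proofs are below) =====
def Claim_equal_runElevator : Prop := ∀ (_startingFloor : Int) (_listOfFloors : List Int), Dom_runElevator _startingFloor _listOfFloors → Spec_runElevator _startingFloor _listOfFloors (runElevator _startingFloor _listOfFloors)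

-- ===== LEMMAS AND PROOFS =====
-- Linear reference: sum of n consecutive hop costs starting at index lo.
def lin (f : List Int) : Nat → Nat → Int
  | _, 0 => 0
  | lo, n + 1 => |f.getD (lo + 1) 0 - f.getD lo 0| * 10 + lin f (lo + 1) n

lemma lin_split (f : List Int) (m : Nat) : ∀ (lo n : Nat),
    lin f lo (m + n) = lin f lo m + lin f (lo + m) n := by
  induction m with
  | zero => intro lo n; simp [lin]
  | succ k ih =>
      intro lo n
      have : k + 1 + n = (k + n) + 1 := by omega
      rw [this]
      simp only [lin, ih (lo + 1) n]
      have : lo + 1 + k = lo + (k + 1) := by omega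
      rw [this]; ring

lemma lin_shift (x : Int) (xs : List Int) (n : Nat) : ∀ (lo : Nat),
    lin (x :: xs) (lo + 1) n = lin xs lo n := by
  induction n with
  | zero => intro lo; simp [lin]
  | succ k ih => intro lo; simp [lin, List.getD, ih (lo + 1)]

lemma travelB_eq_lin (f : List Int) (n : Nat) : ∀ (lo hi : Nat), hi - lo = n →
    travelB f lo hi = lin f lo n := by
  induction n using Nat.strong_induction_on with
  | _ n ih =>
    intro lo hi hn
    match n, hn with
    | 0, hn => rw [travelB]; simp [hn, lin]
    | 1, hn =>
        rw [travelB]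
        have hhi : hi = lo + 1 := by omega
        simp [lin, hhi]
    | (k + 2), hn =>
        rw [travelB]
        have h1 : ¬ hi - lo < 1 := by omega
        have h2 : ¬ hi - lo = 1 := by omega
        simp only [h1, h2, if_false]
        have hm1 : (lo + hi) / 2 - lo < k + 2 := by omega
        have hm2 : hi - (lo + hi) / 2 < k + 2 := by omega
        rw [ih _ hm1 lo _ rfl, ih _ hm2 _ hi rfl]
        have hsum : (lo + hi) / 2 - lo + (hi - (lo + hi) / 2) = k + 2 := by omega
        have hmid : lo + ((lo + hi) / 2 - lo) = (lo + hi) / 2 := by omega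
        rw [← hsum, lin_split, hmid]

-- A's fold: the time component is additive in its accumulator and independent of the list accumulator.
lemma fold_fst_add (l : List Int) : ∀ (s t : Int) (acc acc' : List Int),
    (l.foldl (fun (st : Int × Int × List Int) floor =>
      (st.1 + |st.2.1 - floor| * 10, floor, st.2.2 ++ [floor])) (t, s, acc)).1
    = t + (l.foldl (fun (st : Int × Int × List Int) floor =>
      (st.1 + |st.2.1 - floor| * 10, floor, st.2.2 ++ [floor])) (0, s, acc')).1 := by
  induction l with
  | nil => intro s t acc acc'; simp
  | cons f fs ih =>
      intro s t acc acc'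
      simp only [List.foldl]
      rw [ih f (t + |s - f| * 10) (acc ++ [f]) (acc' ++ [f]),
          ih f (0 + |s - f| * 10) (acc' ++ [f]) (acc' ++ [f])]
      ring

-- A's fold: the visited-list component is the accumulator followed by the stops.
lemma fold_snd (l : List Int) : ∀ (s t : Int) (acc : List Int),
    (l.foldl (fun (st : Int × Int × List Int) floor =>
      (st.1 + |st.2.1 - floor| * 10, floor, st.2.2 ++ [floor])) (t, s, acc)).2.2
    = acc ++ l := by
  induction l with
  | nil => intro s t acc; simp
  | cons f fs ih => intro s t acc; simp [List.foldl, ih]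

lemma runElevator_fst (l : List Int) : ∀ (s : Int),
    (runElevator s l).1 = lin (s :: l) 0 l.length := by
  induction l with
  | nil => intro s; simp [runElevator, lin]
  | cons f fs ih =>
      intro s
      unfold runElevator
      simp only [List.foldl]
      rw [fold_fst_add fs f (0 + |s - f| * 10) ([s] ++ [f]) [f]]
      have hA : (fs.foldl (fun (st : Int × Int × List Int) floor =>
          (st.1 + |st.2.1 - floor| * 10, floor, st.2.2 ++ [floor])) (0, f, [f])).1
          = (runElevator f fs).1 := rfl
      rw [hA, ih f]
      show 0 + |s - f| * 10 + lin (f :: fs) 0 fs.length = lin (s :: f :: fs) 0 (fs.length + 1)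
      have h1 : lin (s :: f :: fs) 0 (fs.length + 1)
          = |f - s| * 10 + lin (s :: f :: fs) 1 fs.length := by
        simp [lin, List.getD]
      rw [h1, lin_shift s (f :: fs) fs.length 0, abs_sub_comm s f]
      ring

lemma runElevator_eq_alt (l : List Int) (s : Int) : runElevator s l = runElevator_alt s l := by
  unfold runElevator_alt
  refine Prod.ext ?_ ?_
  · show (runElevator s l).1 = travelB (s :: l) 0 ((s :: l).length - 1)
    rw [travelB_eq_lin (s :: l) l.length 0 ((s :: l).length - 1) (by simp), runElevator_fst l s]
  · show (runElevator s l).2 = s :: l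
    unfold runElevator
    simpa using fold_snd l s 0 [s]

-- ===== VERDICT (by name: the statement is the Claim_ definition above) =====
theorem runElevator_spec : Claim_equal_runElevator := by
  intro s l _
  exact runElevator_eq_alt l s
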